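-- pv_equiv track=rewrite | github.com/matth-blt/openmodeldb | openmodeldb/downloader.py | pick_best_url
-- ===== SOURCE A (Python) =====
-- def pick_best_url(urls: list[str]) -> str:
--     """Pick the best URL, preferring direct download hosts."""
--     priority = [
--         "objectstorage",
--         "github.com",
--         "huggingface.co",
--         "drive.google.com",
--         "mediafire.com",
--         "mega.nz",
--         "mega.co.nz",
--     ]
--     for host in priority:
--         for url in urls:
--             if host in url:
--                 return url
--     return urls[0]
-- ===== SOURCE B (Python) =====
-- def pick_best_url(urls: list[str]) -> str:
--     priority = [
--         "objectstorage",
--         "github.com",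
--         "huggingface.co",
--         "drive.google.com",
--         "mediafire.com",
--         "mega.nz",
--         "mega.co.nz",
--     ]
--
--     def rank(url):
--         for i, host in enumerate(priority):
--             if host in url:
--                 return i
--         return len(priority)
--
--     best = urls[0]
--     best_rank = rank(best)
--     for url in urls[1:]:
--         r = rank(url)
--         if r < best_rank:
--             best, best_rank = url, r
--     return best
-- ===== Notes on version B (the rewrite author's own statement) =====
-- stated objective: alternative
-- what changed: Replaced the host-outer nested scan (each priority host re-scans all urls) by a single url-indexed selection: each url gets a rank (index of the best host it contains, len(priority) if none) and a one-pass stable argmin picks the earliest url of minimal rank.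
import Mathlib
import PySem

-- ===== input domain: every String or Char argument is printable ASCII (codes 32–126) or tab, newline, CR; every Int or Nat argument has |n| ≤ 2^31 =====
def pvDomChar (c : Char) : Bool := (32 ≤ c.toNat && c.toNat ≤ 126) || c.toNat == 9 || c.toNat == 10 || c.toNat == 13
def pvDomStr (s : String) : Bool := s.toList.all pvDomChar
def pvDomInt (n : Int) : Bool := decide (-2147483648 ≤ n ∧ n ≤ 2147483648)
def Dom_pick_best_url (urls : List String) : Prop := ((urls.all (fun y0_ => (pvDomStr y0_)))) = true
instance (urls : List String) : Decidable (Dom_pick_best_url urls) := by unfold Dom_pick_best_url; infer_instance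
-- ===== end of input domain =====

-- B replaces A's host-outer nested scan by per-url ranks and a one-pass stable argmin (alternative decomposition, same cost).


-- ===== PORT A =====
def pvPriority : List String :=
  ["objectstorage", "github.com", "huggingface.co", "drive.google.com",
   "mediafire.com", "mega.nz", "mega.co.nz"]

-- inner loop: 'for url in urls: if host in url: return url'
def pvFindUrl (host : String) : List String → Option String
  | [] => none
  | u :: us => if PySem.Str.isIn host u then some u else pvFindUrl host us

-- outer loop: 'for host in priority: …'
def pvALoop (urls : List String) : List String → Option String
  | [] => none
  | h :: hs =>
    match pvFindUrl h urls with
    | some u => some u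
    | none => pvALoop urls hs

def pick_best_url (urls : List String) : String :=
  match pvALoop urls pvPriority with
  | some u => u
  | none => (PySem.List.pyGet? urls 0).getD ""   -- urls[0]; IndexError on [] is excluded by Pre_

-- ===== PORT B =====
-- 'def rank(url): for i, host in enumerate(priority): if host in url: return i; return len(priority)'
def pvRankAux (url : String) : List String → Nat
  | [] => 0
  | h :: hs => if PySem.Str.isIn h url then 0 else 1 + pvRankAux url hs

def pvRank (url : String) : Nat := pvRankAux url pvPriority

-- 'for url in urls[1:]: r = rank(url); if r < best_rank: best, best_rank = url, r'
def pvBLoop (r : String → Nat) (best : String) (bestRank : Nat) : List String → String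
  | [] => best
  | u :: us =>
    if r u < bestRank then pvBLoop r u (r u) us else pvBLoop r best bestRank us

def pick_best_url_alt (urls : List String) : String :=
  match urls with
  | [] => ""    -- urls[0]: IndexError, excluded by Pre_
  | u :: us => pvBLoop pvRank u (pvRank u) us

-- ===== PRECONDITION & SPEC =====
-- excluded: the empty list, where both A's and B's urls[0] raise IndexError
def Pre_pick_best_url (urls : List String) : Prop := urls ≠ []
instance (urls : List String) : Decidable (Pre_pick_best_url urls) := by unfold Pre_pick_best_url; infer_instance
def pvWitness_pick_best_url : List String := (["https://github.com/x/y", "https://example.com/z"])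

def Spec_pick_best_url (urls : List String) (out : String) : Prop := out = pick_best_url_alt urls
instance (urls : List String) (out : String) : Decidable (Spec_pick_best_url urls out) := by unfold Spec_pick_best_url; infer_instance

-- ===== CLAIM (what is proved, stated in full; the proofs are below) =====
def Claim_equal_pick_best_url : Prop := ∀ (urls : List String), Dom_pick_best_url urls → Pre_pick_best_url urls → Spec_pick_best_url urls (pick_best_url urls)

-- ===== LEMMAS AND PROOFS =====

-- minimal rank over u :: us
def pvMinOver (r : String → Nat) (u : String) (us : List String) : Nat :=
  us.foldr (fun v m => min (r v) m) (r u)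

-- first element of u :: us attaining the minimal rank
def pvFirstMin (r : String → Nat) (u : String) (us : List String) : String :=
  ((u :: us).find? (fun v => r v == pvMinOver r u us)).getD u

theorem pvFindUrl_eq_find? (host : String) (l : List String) :
    pvFindUrl host l = l.find? (fun u => PySem.Str.isIn host u) := by
  induction l with
  | nil => rfl
  | cons u us ih => simp [pvFindUrl, List.find?, ih]; split_ifs <;> simp_all

theorem pvFind?_congr {a : Type} (p q : a → Bool) (l : List a)
    (h : ∀ x ∈ l, p x = q x) : l.find? p = l.find? q := by
  induction l with
  | nil => rfl
  | cons x l ih =>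
    simp only [List.find?]
    rw [h x (by simp)]
    cases q x with
    | true => rfl
    | false => exact ih (fun y hy => h y (by simp [hy]))

theorem pvBeq_add_one (a b : Nat) : ((1 + a == 1 + b) : Bool) = (a == b) := by
  cases h : (a == b) <;> simp at h ⊢ <;> omega

theorem pvMinOver_le (r : String → Nat) : ∀ (us : List String) (u : String),
    ∀ v ∈ u :: us, pvMinOver r u us ≤ r v := by
  intro us
  induction us with
  | nil =>
    intro u v hv
    rcases List.mem_cons.mp hv with h | h
    · subst h; exact Nat.le_refl _
    · simp at h
  | cons w ws ih =>
    intro u v hv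
    have hcons : pvMinOver r u (w :: ws) = min (r w) (pvMinOver r u ws) := rfl
    rcases List.mem_cons.mp hv with h | h
    · have := ih u u (by simp); rw [h]; omega
    · rcases List.mem_cons.mp h with h2 | h2
      · subst h2; omega
      · have := ih u v (by simp [h2]); omega

theorem pvMinOver_swap (r : String → Nat) : ∀ (vs : List String) (u v : String),
    min (r v) (pvMinOver r u vs) = min (r u) (pvMinOver r v vs) := by
  intro vs
  induction vs with
  | nil => intro u v; show min (r v) (r u) = min (r u) (r v); omega
  | cons w ws ih =>
    intro u v
    have h1 : pvMinOver r u (w :: ws) = min (r w) (pvMinOver r u ws) := rfl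
    have h2 : pvMinOver r v (w :: ws) = min (r w) (pvMinOver r v ws) := rfl
    have := ih u v
    omega

theorem pvMinOver_attained (r : String → Nat) : ∀ (us : List String) (u : String),
    ∃ w ∈ u :: us, r w = pvMinOver r u us := by
  intro us
  induction us with
  | nil => intro u; exact ⟨u, by simp, rfl⟩
  | cons v vs ih =>
    intro u
    obtain ⟨w, hw, hrw⟩ := ih u
    have hc : pvMinOver r u (v :: vs) = min (r v) (pvMinOver r u vs) := rfl
    by_cases h : r v ≤ pvMinOver r u vs
    · exact ⟨v, by simp, by omega⟩
    · refine ⟨w, ?_, by omega⟩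
      rcases List.mem_cons.mp hw with rfl | h2
      · simp
      · simp [h2]

theorem pvFind?_min_some (r : String → Nat) (us : List String) (u : String) :
    ∃ w, (u :: us).find? (fun v => r v == pvMinOver r u us) = some w := by
  obtain ⟨w, hw, hrw⟩ := pvMinOver_attained r us u
  have hsome : ((u :: us).find? (fun v => r v == pvMinOver r u us)).isSome := by
    rw [List.find?_isSome]; exact ⟨w, hw, by simp [hrw]⟩
  exact Option.isSome_iff_exists.mp hsome

theorem pvMinOver_congr (r r' : String → Nat) : ∀ (us : List String) (u : String),
    (∀ v ∈ u :: us, r v = 1 + r' v) → pvMinOver r u us = 1 + pvMinOver r' u us := by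
  intro us
  induction us with
  | nil => intro u h; exact h u (by simp)
  | cons w ws ih =>
    intro u h
    have hu : pvMinOver r u ws = 1 + pvMinOver r' u ws :=
      ih u (fun v hv => by
        rcases List.mem_cons.mp hv with rfl | h2
        · exact h v (by simp)
        · exact h v (by simp [h2]))
    have hw := h w (by simp)
    show min (r w) (pvMinOver r u ws) = 1 + min (r' w) (pvMinOver r' u ws)
    omega

-- B's loop computes the first element of minimal rank
theorem pvBLoop_char (r : String → Nat) (us : List String) : ∀ u,
    pvBLoop r u (r u) us = pvFirstMin r u us := by
  induction us with
  | nil => intro u; simp [pvBLoop, pvFirstMin, pvMinOver, List.find?]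
  | cons v vs ih =>
    intro u
    have hcons : pvMinOver r u (v :: vs) = min (r v) (pvMinOver r u vs) := rfl
    by_cases hlt : r v < r u
    · -- new best v; u can never attain the minimum
      have hlev := pvMinOver_le r vs v v (by simp)
      have hMv : pvMinOver r u (v :: vs) = pvMinOver r v vs := by
        have hsw := pvMinOver_swap r vs u v
        omega
      have hru : (r u == pvMinOver r v vs) = false := by simp; omega
      obtain ⟨w, hw⟩ := pvFind?_min_some r vs v
      calc pvBLoop r u (r u) (v :: vs) = pvBLoop r v (r v) vs := by
            simp [pvBLoop, hlt]
        _ = pvFirstMin r v vs := ih v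
        _ = w := by simp [pvFirstMin, hw]
        _ = pvFirstMin r u (v :: vs) := by
            unfold pvFirstMin
            rw [hMv, List.find?_cons_of_neg (by simp [hru]), hw]
            rfl
    · -- keep best u
      have hleu := pvMinOver_le r vs u u (by simp)
      have hMeq : pvMinOver r u (v :: vs) = pvMinOver r u vs := by omega
      simp only [pvBLoop, if_neg hlt]
      rw [ih u]
      unfold pvFirstMin
      rw [hMeq]
      by_cases hu : r u = pvMinOver r u vs
      · simp [List.find?, hu]
      · have hnu : (r u == pvMinOver r u vs) = false := by simp [hu]
        have hnv : (r v == pvMinOver r u vs) = false := by simp; omega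
        simp [List.find?, hnu, hnv]

-- A's nested loops also return the first element of minimal rank
theorem pvALoop_char (P : List String) : ∀ (u : String) (us : List String),
    (match pvALoop (u :: us) P with
     | some v => v
     | none => u) = pvFirstMin (fun v => pvRankAux v P) u us := by
  induction P with
  | nil =>
    intro u us
    show u = pvFirstMin (fun v => pvRankAux v []) u us
    have hz : ∀ (l : List String), pvMinOver (fun v => pvRankAux v []) u l = 0 := by
      intro l
      induction l with
      | nil => rfl
      | cons w ws ihw =>
        show min (pvRankAux w []) (pvMinOver (fun v => pvRankAux v []) u ws) = 0
        have h0 : pvRankAux w [] = 0 := rfl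
        omega
    unfold pvFirstMin
    rw [hz us]
    simp [List.find?, pvRankAux]
  | cons h hs ih =>
    intro u us
    set r := fun v => pvRankAux v (h :: hs) with hr
    have hrdef : ∀ v, r v = if PySem.Str.isIn h v then 0 else 1 + pvRankAux v hs := by
      intro v; simp [hr, pvRankAux]
    cases hf : pvFindUrl h (u :: us) with
    | some w =>
      -- some url contains h: A returns the first such, whose rank 0 is the minimum
      have hfind : List.find? (fun v => PySem.Str.isIn h v) (u :: us) = some w := by
        rw [← pvFindUrl_eq_find?]; exact hf
      have hw_mem := List.mem_of_find?_eq_some hfind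
      have hw_in : PySem.Str.isIn h w = true := List.find?_some hfind
      have hM0 : pvMinOver r u us = 0 := by
        have h1 := pvMinOver_le r us u w hw_mem
        have h2 : r w = 0 := by rw [hrdef w, if_pos hw_in]
        omega
      have hcongr : ∀ v ∈ u :: us,
          ((fun v => r v == pvMinOver r u us) v) = PySem.Str.isIn h v := by
        intro v _
        show (r v == pvMinOver r u us) = PySem.Str.isIn h v
        rw [hM0, hrdef v]
        cases hin : PySem.Str.isIn h v <;> simp
      have hfm : pvFirstMin r u us = w := by
        unfold pvFirstMin
        rw [pvFind?_congr _ _ _ hcongr, hfind]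
        rfl
      simp only [pvALoop, hf]
      exact hfm.symm
    | none =>
      -- no url contains h: every rank is 1 + rank w.r.t. hs, so the argmin is unchanged
      have hfind : List.find? (fun v => PySem.Str.isIn h v) (u :: us) = none := by
        rw [← pvFindUrl_eq_find?]; exact hf
      have hnone : ∀ v ∈ u :: us, PySem.Str.isIn h v = false := by
        intro v hv
        have h2 := List.find?_eq_none.mp hfind v hv
        revert h2
        cases PySem.Str.isIn h v <;> simp
      have hstep : ∀ v ∈ u :: us, r v = 1 + pvRankAux v hs := by
        intro v hv; rw [hrdef v, if_neg (by rw [hnone v hv]; simp)]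
      have hM : pvMinOver r u us = 1 + pvMinOver (fun v => pvRankAux v hs) u us :=
        pvMinOver_congr _ _ _ _ hstep
      have hfm : pvFirstMin r u us = pvFirstMin (fun v => pvRankAux v hs) u us := by
        unfold pvFirstMin
        rw [hM, pvFind?_congr _ (fun v => pvRankAux v hs == pvMinOver (fun v => pvRankAux v hs) u us) _ (by
          intro v hv
          show (r v == 1 + pvMinOver (fun v => pvRankAux v hs) u us) = _
          rw [hstep v hv, pvBeq_add_one])]
      simp only [pvALoop, hf]
      rw [ih u us]
      exact hfm.symm

-- ===== VERDICT (by name: the statement is the Claim_ definition above) =====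
theorem pick_best_url_spec : Claim_equal_pick_best_url := by
  intro urls _ hpre
  unfold Spec_pick_best_url
  match urls with
  | [] => exact absurd rfl hpre
  | u :: us =>
    calc pick_best_url (u :: us)
        = (match pvALoop (u :: us) pvPriority with | some v => v | none => u) := by
          cases hA : pvALoop (u :: us) pvPriority <;>
            simp [pick_best_url, hA, PySem.List.pyGet?, PySem.List.pyIdx?]
      _ = pvFirstMin (fun v => pvRankAux v pvPriority) u us := pvALoop_char pvPriority u us
      _ = pvBLoop pvRank u (pvRank u) us := (pvBLoop_char pvRank us u).symm
      _ = pick_best_url_alt (u :: us) := rfl
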